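-- pv_equiv track=rewrite | github.com/NickMau01/container-security-analyzer | report/report.py | _insert_wbr_breaks
-- ===== SOURCE A (Python) =====
-- def _insert_wbr_breaks(s: str) -> str:
--     if not s:
--         return ""
--     out = []
--     for ch in str(s):
--         out.append(ch)
--         if ch in "_/.\\":  # keep same behavior
--             out.append("<wbr>")
--     return "".join(out)
-- ===== SOURCE B (Python) =====
-- def _insert_wbr_breaks(s: str) -> str:
--     if not s:
--         return ""
--     t = str(s)
--     for sep in "_/.\\":
--         t = t.replace(sep, sep + "<wbr>")
--     return t
-- ===== Notes on version B (the rewrite author's own statement) =====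
-- stated objective: faster
-- what changed: Replaces the character-by-character Python loop with an output buffer by one whole-string str.replace pass per separator character; correct because the inserted break tag contains no separator character.
import Mathlib
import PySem

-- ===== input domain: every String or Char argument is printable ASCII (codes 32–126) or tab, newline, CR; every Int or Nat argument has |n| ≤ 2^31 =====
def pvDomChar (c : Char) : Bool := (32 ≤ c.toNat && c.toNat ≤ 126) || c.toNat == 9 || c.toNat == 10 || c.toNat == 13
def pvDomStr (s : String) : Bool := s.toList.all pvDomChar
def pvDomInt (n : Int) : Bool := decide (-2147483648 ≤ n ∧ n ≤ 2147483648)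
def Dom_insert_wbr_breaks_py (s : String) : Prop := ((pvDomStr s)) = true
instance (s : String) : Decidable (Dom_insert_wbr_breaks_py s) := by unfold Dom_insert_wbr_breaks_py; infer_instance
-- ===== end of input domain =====

-- B replaces A's character-by-character pass with one whole-string replace per separator (measured faster at large sizes).

-- ===== PORT A =====
-- A: build a list of pieces (each char, plus "<wbr>" after separator chars), then "".join.
def insert_wbr_breaks_py (s : String) : String :=
  if s = "" then ""
  else
    let out := s.toList.foldl (fun (out : List (List Char)) ch =>
      let out := out ++ [[ch]]
      if PySem.Chars.isIn [ch] "_/.\\".toList then out ++ ["<wbr>".toList] else out) []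
    String.ofList (PySem.Chars.join [] out)

-- ===== PORT B =====
-- B: for sep in "_/.\": t = t.replace(sep, sep + "<wbr>")
def insert_wbr_breaks_py_alt (s : String) : String :=
  if s = "" then ""
  else
    String.ofList (("_/.\\".toList).foldl
      (fun t sep => PySem.Chars.replace t [sep] (sep :: "<wbr>".toList)) s.toList)

-- ===== PRECONDITION & SPEC =====
def Spec_insert_wbr_breaks_py (s : String) (out : String) : Prop := out = insert_wbr_breaks_py_alt s
instance (s : String) (out : String) : Decidable (Spec_insert_wbr_breaks_py s out) := by unfold Spec_insert_wbr_breaks_py; infer_instance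

-- ===== CLAIM (what is proved, stated in full; the proofs are below) =====
def Claim_equal_insert_wbr_breaks_py : Prop := ∀ (s : String), Dom_insert_wbr_breaks_py s → Spec_insert_wbr_breaks_py s (insert_wbr_breaks_py s)

-- ===== LEMMAS AND PROOFS =====

-- single-character replace is a flatMap over the characters
theorem replace_go_single (c : Char) (n : List Char) :
    ∀ (l : List Char) (fuel : Nat) (acc : List Char), l.length ≤ fuel →
    PySem.Chars.replace.go [c] n fuel l acc
      = acc.reverse ++ l.flatMap (fun x => if x = c then n else [x]) := by
  intro l
  induction l with
  | nil =>
    intro fuel acc _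
    cases fuel <;> simp [PySem.Chars.replace.go]
  | cons x t ih =>
    intro fuel acc hle
    cases fuel with
    | zero => simp at hle
    | succ m =>
      simp only [PySem.Chars.replace.go]
      by_cases hx : x = c
      · subst hx
        have hpre : [x].isPrefixOf (x :: t) = true := by
          simp [List.isPrefixOf]
        simp only [hpre, if_pos, List.length_singleton, List.drop_succ_cons, List.drop_zero]
        rw [ih m (n.reverse ++ acc) (by simpa using Nat.le_of_succ_le_succ hle)]
        simp
      · have hpre : [c].isPrefixOf (x :: t) = false := by
          simp only [List.isPrefixOf, Bool.and_eq_false_iff, beq_eq_false_iff_ne]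
          exact Or.inl fun h => hx h.symm
        simp only [hpre, Bool.false_eq_true, if_false]
        rw [ih m (x :: acc) (by simpa using Nat.le_of_succ_le_succ hle)]
        simp [hx]

theorem replace_single (c : Char) (n : List Char) (l : List Char) :
    PySem.Chars.replace l [c] n = l.flatMap (fun x => if x = c then n else [x]) := by
  simp only [PySem.Chars.replace, List.isEmpty_cons, Bool.false_eq_true, if_false]
  exact replace_go_single c n l l.length [] (le_refl _)

-- "".join is flatten
theorem join_nil_flatten (xs : List (List Char)) :
    PySem.Chars.join [] xs = xs.flatten := by
  induction xs with
  | nil => simp [PySem.Chars.join, List.intercalate]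
  | cons a t ih =>
    cases t with
    | nil => simp [PySem.Chars.join, List.intercalate]
    | cons b t' =>
      simp only [PySem.Chars.join, List.intercalate] at *
      simp [List.intersperse] at ih ⊢
      simpa using ih

-- membership form of `ch in "_/.\"`
theorem isIn_singleton (c : Char) (l : List Char) :
    PySem.Chars.isIn [c] l = l.contains c := by
  by_cases h : c ∈ l
  · rw [(PySem.Chars.isIn_iff_infix [c] l).2 ?_, List.contains_eq_mem, decide_eq_true h]
    rcases List.append_of_mem h with ⟨p, q, rfl⟩
    exact ⟨p, q, by simp⟩
  · rw [(PySem.Chars.isIn_eq_false_iff [c] l).2 ?_]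
    · simp [List.contains_eq_mem, h]
    · intro hin
      exact h (hin.mem (by simp))

def pvG (x : Char) : List Char :=
  if x ∈ ("_/.\\".toList) then x :: "<wbr>".toList else [x]

-- A's fold produces pieces whose flatten is flatMap pvG
theorem a_fold_flatten (cs : List Char) (acc : List (List Char)) :
    (cs.foldl (fun (out : List (List Char)) ch =>
      let out := out ++ [[ch]]
      if PySem.Chars.isIn [ch] "_/.\\".toList then out ++ ["<wbr>".toList] else out) acc).flatten
      = acc.flatten ++ cs.flatMap pvG := by
  induction cs generalizing acc with
  | nil => simp
  | cons x t ih =>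
    simp only [List.foldl_cons, List.flatMap_cons]
    rw [isIn_singleton]
    by_cases hx : x ∈ "_/.\\".toList
    · rw [if_pos (by simpa [List.contains_eq_mem] using hx), ih]
      have hx' : x = '_' ∨ x = '/' ∨ x = '.' ∨ x = '\\' := by simpa using hx
      simp [pvG, hx']
    · rw [if_neg (by simpa [List.contains_eq_mem] using hx), ih]
      have hx' : ¬ (x = '_' ∨ x = '/' ∨ x = '.' ∨ x = '\\') := by simpa using hx
      simp [pvG, hx']

def pvF (c : Char) (x : Char) : List Char := if x = c then c :: "<wbr>".toList else [x]

-- the per-character action of B's four replaces equals pvG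
theorem chain_pointwise (x : Char) :
    ((((pvF '_' x).flatMap (pvF '/')).flatMap (pvF '.')).flatMap (pvF '\\')) = pvG x := by
  by_cases h1 : x = '_'
  · subst h1; decide
  · by_cases h2 : x = '/'
    · subst h2; decide
    · by_cases h3 : x = '.'
      · subst h3; decide
      · by_cases h4 : x = '\\'
        · subst h4; decide
        · simp [pvF, pvG, h1, h2, h3, h4]

theorem b_fold_flatMap (cs : List Char) :
    ("_/.\\".toList).foldl
      (fun t sep => PySem.Chars.replace t [sep] (sep :: "<wbr>".toList)) cs
      = cs.flatMap pvG := by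
  show PySem.Chars.replace (PySem.Chars.replace (PySem.Chars.replace (PySem.Chars.replace cs
      ['_'] _) ['/'] _) ['.'] _) ['\\'] _ = _
  rw [replace_single, replace_single, replace_single, replace_single]
  show ((((cs.flatMap (pvF '_')).flatMap (pvF '/')).flatMap (pvF '.')).flatMap (pvF '\\')) = _
  rw [List.flatMap_assoc, List.flatMap_assoc, List.flatMap_assoc]
  exact List.flatMap_congr (fun x _ => by
    simpa [List.flatMap_assoc] using chain_pointwise x)

-- ===== VERDICT (by name: the statement is the Claim_ definition above) =====
theorem insert_wbr_breaks_py_spec : Claim_equal_insert_wbr_breaks_py := by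
  intro s _
  unfold Spec_insert_wbr_breaks_py insert_wbr_breaks_py insert_wbr_breaks_py_alt
  by_cases hs : s = ""
  · simp [hs]
  · rw [if_neg hs, if_neg hs, b_fold_flatMap]
    show String.ofList (PySem.Chars.join [] _) = _
    rw [join_nil_flatten, a_fold_flatten]
    simp
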